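-- pv_equiv track=rewrite | github.com/imobanco/icnab240 | icnab240/pipe_and_filter/build.py | build_cnab_lines
-- ===== SOURCE A (Python) =====
-- def build_cnab_lines(pieces):
--     """
--     Junta as strings baseado no '\n' e forma um elemento de lista de linhas
--
--
--     Args:
--         pieces: lista na qual cada elemento é uma string e que alguns acabam com '\n'
--
--     Returns:
--         lista na qual cada elemento acaba com '\n'
--     """
--     glued_lines = []
--     line = ""
--     for piece in pieces:
--         line += piece
--         if "\n" in piece:
--             glued_lines.append(line)
--             line = ""
--     return glued_lines
-- ===== SOURCE B (Python) =====
-- def build_cnab_lines(pieces):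
--     """Search-and-slice: repeatedly find the first piece containing '\n',
--     join everything up to and including it into one line, and recurse on the rest."""
--     pieces = list(pieces)
--     lines = []
--     while True:
--         i = next((k for k, p in enumerate(pieces) if "\n" in p), None)
--         if i is None:
--             return lines
--         lines.append("".join(pieces[:i + 1]))
--         pieces = pieces[i + 1:]
-- ===== Notes on version B (the rewrite author's own statement) =====
-- stated objective: alternative
-- what changed: A accumulates pieces into a pending line and flushes it whenever a piece contains a newline, in one fold; B instead repeatedly searches for the index of the first newline-bearing piece, joins the slice up to and including it into a line, and recurses on the remaining suffix (trailing pieces after the last newline are dropped by both).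
import Mathlib
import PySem

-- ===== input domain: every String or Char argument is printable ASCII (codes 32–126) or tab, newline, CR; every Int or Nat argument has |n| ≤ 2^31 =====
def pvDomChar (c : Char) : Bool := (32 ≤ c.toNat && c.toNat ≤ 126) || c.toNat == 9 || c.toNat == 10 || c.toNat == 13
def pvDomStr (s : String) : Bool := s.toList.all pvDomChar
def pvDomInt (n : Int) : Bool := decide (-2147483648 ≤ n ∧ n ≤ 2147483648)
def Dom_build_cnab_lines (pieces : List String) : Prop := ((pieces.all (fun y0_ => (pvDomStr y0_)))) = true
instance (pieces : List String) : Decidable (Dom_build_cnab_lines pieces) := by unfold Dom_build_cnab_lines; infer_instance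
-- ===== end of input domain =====

-- B replaces A's single accumulate-and-flush pass by a search-and-slice decomposition:
-- repeatedly find the first piece containing '\n', join the slice up to it, recurse on the rest.


-- ===== PORT A =====
-- for piece in pieces: line += piece; if "\n" in piece: glued_lines.append(line); line = ""
def build_cnab_lines (pieces : List String) : List String :=
  (pieces.foldl
    (fun (st : List String × String) piece =>
      let line := st.2 ++ piece
      if PySem.Str.isIn "\n" piece then (st.1 ++ [line], "") else (st.1, line))
    ([], "")).1

-- ===== PORT B =====
-- i = next((k for k, p in enumerate(pieces) if "\n" in p), None)  →  List.findIdx?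
-- "".join(pieces[:i+1])  →  PySem.Str.join "" (pieces.take (i+1));  pieces = pieces[i+1:]  →  drop
def build_cnab_lines_alt (pieces : List String) : List String :=
  match h : pieces.findIdx? (fun p => PySem.Str.isIn "\n" p) with
  | none => []
  | some i =>
    PySem.Str.join "" (pieces.take (i + 1)) :: build_cnab_lines_alt (pieces.drop (i + 1))
termination_by pieces.length
decreasing_by
  cases pieces with
  | nil => simp at h
  | cons a as => simp

-- ===== PRECONDITION & SPEC =====
def Spec_build_cnab_lines (pieces : List String) (out : List String) : Prop := out = build_cnab_lines_alt pieces
instance (pieces : List String) (out : List String) : Decidable (Spec_build_cnab_lines pieces out) := by unfold Spec_build_cnab_lines; infer_instance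

-- ===== CLAIM (what is proved, stated in full; the proofs are below) =====
def Claim_equal_build_cnab_lines : Prop := ∀ (pieces : List String), Dom_build_cnab_lines pieces → Spec_build_cnab_lines pieces (build_cnab_lines pieces)

-- ===== LEMMAS AND PROOFS =====

-- ''.join with empty separator peels off the head piece
theorem join_empty_cons (x : String) (xs : List String) :
    PySem.Str.join "" (x :: xs) = x ++ PySem.Str.join "" xs := by
  cases xs with
  | nil => simp [PySem.Str.join, PySem.Chars.join_singleton, PySem.Chars.join_nil, String.ofList_toList]
  | cons y ys =>
    simp [PySem.Str.join, PySem.Chars.join_cons_cons, String.ofList_append, String.ofList_toList]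

theorem join_empty_singleton (x : String) : PySem.Str.join "" [x] = x := by
  simp [PySem.Str.join, PySem.Chars.join_singleton, String.ofList_toList]

-- unfolding equations for B's port, by the value of the first-newline search
theorem alt_of_none (ps : List String)
    (h : ps.findIdx? (fun p => PySem.Str.isIn "\n" p) = none) :
    build_cnab_lines_alt ps = [] := by
  rw [build_cnab_lines_alt.eq_def]
  split
  · rfl
  · rename_i i heq
    rw [h] at heq
    cases heq

theorem alt_of_some (ps : List String) (i : Nat)
    (h : ps.findIdx? (fun p => PySem.Str.isIn "\n" p) = some i) :
    build_cnab_lines_alt ps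
      = PySem.Str.join "" (ps.take (i + 1)) :: build_cnab_lines_alt (ps.drop (i + 1)) := by
  rw [build_cnab_lines_alt.eq_def]
  split
  · rename_i heq
    rw [h] at heq
    cases heq
  · rename_i j heq
    rw [h] at heq
    cases heq
    rfl

-- A's loop as a plain structural recursion on the remaining pieces and the pending line
def goA : List String → String → List String
  | [], _ => []
  | p :: ps, l =>
    if PySem.Str.isIn "\n" p then (l ++ p) :: goA ps "" else goA ps (l ++ p)

theorem fold_eq_goA (ps : List String) (g : List String) (l : String) :
    (ps.foldl
      (fun (st : List String × String) piece =>
        let line := st.2 ++ piece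
        if PySem.Str.isIn "\n" piece then (st.1 ++ [line], "") else (st.1, line))
      (g, l)).1 = g ++ goA ps l := by
  induction ps generalizing g l with
  | nil => simp [goA]
  | cons p ps ih =>
    rw [List.foldl_cons, goA]
    by_cases hp : PySem.Str.isIn "\n" p = true
    · rw [if_pos hp, if_pos hp, ih, List.append_assoc]
      rfl
    · rw [if_neg hp, if_neg hp, ih]

-- the pending line l is a prefix of B's first produced line; the rest coincides
theorem goA_eq_alt (ps : List String) (l : String) :
    goA ps l = (match build_cnab_lines_alt ps with
                | [] => []
                | x :: xs => (l ++ x) :: xs) := by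
  induction ps generalizing l with
  | nil =>
    rw [alt_of_none [] (by simp)]
    simp [goA]
  | cons p ps ih =>
    rw [goA]
    by_cases hp : PySem.Str.isIn "\n" p = true
    · have hfc : (p :: ps).findIdx? (fun q => PySem.Str.isIn "\n" q) = some 0 := by
        simp only [List.findIdx?_cons]
        rw [if_pos hp]
      rw [if_pos hp, alt_of_some _ 0 hfc, List.take_succ_cons, List.take_zero,
          List.drop_succ_cons, List.drop_zero, join_empty_singleton, ih ""]
      cases build_cnab_lines_alt ps <;> simp
    · have hfc : (p :: ps).findIdx? (fun q => PySem.Str.isIn "\n" q)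
          = (ps.findIdx? (fun q => PySem.Str.isIn "\n" q)).map (· + 1) := by
        simp only [List.findIdx?_cons]
        rw [if_neg hp]
      rw [if_neg hp, ih (l ++ p)]
      cases hf : ps.findIdx? (fun q => PySem.Str.isIn "\n" q) with
      | none =>
        rw [alt_of_none ps hf, alt_of_none (p :: ps) (by rw [hfc, hf]; rfl)]
      | some i =>
        rw [alt_of_some ps i hf,
            alt_of_some (p :: ps) (i + 1) (by rw [hfc, hf]; rfl),
            List.take_succ_cons, List.drop_succ_cons, join_empty_cons]
        simp [String.append_assoc]

-- ===== VERDICT (by name: the statement is the Claim_ definition above) =====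
theorem build_cnab_lines_spec : Claim_equal_build_cnab_lines := by
  intro pieces _
  unfold Spec_build_cnab_lines build_cnab_lines
  rw [fold_eq_goA, goA_eq_alt]
  cases build_cnab_lines_alt pieces <;> simp
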